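-- pv_equiv track=rewrite | github.com/pypi-data/pypi-mirror-354 | packages/parsli/parsli-1.2.4.tar.gz/parsli-1.2.4/src/parsli/utils/core.py | sort_fields
-- ===== SOURCE A (Python) =====
-- def sort_fields(names):
--     remaining = []
--     group_count = 0
--     groups = {
--         "strike_slip": [],
--         "dip_slip": [],
--         "tensile_slip": [],
--     }
--     for name in names:
--         k = "_".join(name.split("_")[:2])
--         if k in groups:
--             groups[k].append(name)
--             groups[k].sort()
--             group_count += 1
--         else:
--             remaining.append(name)
--             remaining.sort()
--
--     sorted_list = []
--     while group_count:
--         for v in groups.values():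
--             if len(v):
--                 sorted_list.append(v.pop(0))
--                 group_count -= 1
--     sorted_list.extend(remaining)
--
--     return sorted_list
-- ===== SOURCE B (Python) =====
-- def sort_fields(names):
--     # B: bucket in one pass, sort each bucket once, interleave by index; same output as A.
--     ss, ds, ts, remaining = [], [], [], []
--     for name in names:
--         k = "_".join(name.split("_")[:2])
--         if k == "strike_slip":
--             ss.append(name)
--         elif k == "dip_slip":
--             ds.append(name)
--         elif k == "tensile_slip":
--             ts.append(name)
--         else:
--             remaining.append(name)
--     cols = [sorted(ss), sorted(ds), sorted(ts)]
--     m = max(len(cols[0]), len(cols[1]), len(cols[2]))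
--     out = [c[i] for i in range(m) for c in cols if i < len(c)]
--     out.extend(sorted(remaining))
--     return out
-- ===== Notes on version B (the rewrite author's own statement) =====
-- stated objective: faster
-- what changed: A re-sorts a bucket after every append and pops heads from mutating lists in a while loop; B buckets in one pass, sorts each of the three groups and the remainder exactly once, and builds the round-robin interleave by index with a comprehension.
import Mathlib
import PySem

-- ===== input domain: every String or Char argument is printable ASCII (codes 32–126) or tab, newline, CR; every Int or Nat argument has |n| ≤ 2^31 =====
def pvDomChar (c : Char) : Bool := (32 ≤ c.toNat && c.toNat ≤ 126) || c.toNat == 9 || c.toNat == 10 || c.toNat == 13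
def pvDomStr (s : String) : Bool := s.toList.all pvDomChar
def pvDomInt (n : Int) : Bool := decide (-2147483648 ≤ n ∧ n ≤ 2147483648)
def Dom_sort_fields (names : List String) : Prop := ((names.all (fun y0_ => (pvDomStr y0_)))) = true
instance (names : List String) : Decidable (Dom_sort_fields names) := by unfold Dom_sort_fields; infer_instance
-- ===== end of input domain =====

-- B buckets the names in one pass, sorts each of the three groups (and the remainder)
-- once and interleaves them by index, instead of A's re-sort-after-every-append and
-- pop(0)-based while loop; same return value on every input.


-- k = "_".join(name.split("_")[:2])  (both Pythons compute this identically;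
-- split? is always `some` here because the separator "_" is nonempty)
def pvKey (name : String) : String :=
  PySem.Str.join "_" (PySem.List.slice ((PySem.Str.split? name "_").getD []) none (some 2))

-- ===== PORT A =====
-- body of the first for-loop; state: (remaining, group_count, groups)
def pvAStep (st : List String × Int × PySem.Dict String (List String)) (name : String) :
    List String × Int × PySem.Dict String (List String) :=
  let k := pvKey name
  match st.2.2.get? k with
  | some v =>
      (st.1, st.2.1 + 1, st.2.2.insert k (PySem.List.sorted (v ++ [name]) (fun x => x) false))
  | none =>
      (PySem.List.sorted (st.1 ++ [name]) (fun x => x) false, st.2.1, st.2.2)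

-- one key of the 'for v in groups.values()' sweep; state: (groups, group_count, sorted_list)
def pvAPass (st : PySem.Dict String (List String) × Int × List String) (k : String) :
    PySem.Dict String (List String) × Int × List String :=
  match st.1.get? k with
  | some (x :: xs) => (st.1.insert k xs, st.2.1 - 1, st.2.2 ++ [x])
  | _ => st

-- while group_count: … ; the 'else st.2.2' branch is a pure totalization guard: it is
-- reached only when a sweep makes no progress, where the Python while loop would not
-- terminate (never the case for the states sort_fields builds).
def pvALoop (groups : PySem.Dict String (List String)) (gc : Int) (sl : List String) :
    List String :=
  if gc = 0 then sl
  else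
    let st := groups.keys.foldl pvAPass (groups, gc, sl)
    if h : 0 < gc ∧ st.2.1 < gc then pvALoop st.1 st.2.1 st.2.2
    else st.2.2
termination_by gc.toNat
decreasing_by exact (Int.toNat_lt_toNat h.1).mpr h.2

def sort_fields (names : List String) : List String :=
  let groups0 : PySem.Dict String (List String) :=
    PySem.Dict.ofList [("strike_slip", []), ("dip_slip", []), ("tensile_slip", [])]
  let st := names.foldl pvAStep ([], 0, groups0)
  pvALoop st.2.2 st.2.1 [] ++ st.1

-- ===== PORT B =====
-- body of B's single bucketing loop; state: (ss, ds, ts, remaining)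
def pvBStep (st : List String × List String × List String × List String) (name : String) :
    List String × List String × List String × List String :=
  let k := pvKey name
  if k = "strike_slip" then (st.1 ++ [name], st.2.1, st.2.2.1, st.2.2.2)
  else if k = "dip_slip" then (st.1, st.2.1 ++ [name], st.2.2.1, st.2.2.2)
  else if k = "tensile_slip" then (st.1, st.2.1, st.2.2.1 ++ [name], st.2.2.2)
  else (st.1, st.2.1, st.2.2.1, st.2.2.2 ++ [name])

def sort_fields_alt (names : List String) : List String :=
  let st := names.foldl pvBStep ([], [], [], [])
  let s1 := PySem.List.sorted st.1 (fun x => x) false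
  let s2 := PySem.List.sorted st.2.1 (fun x => x) false
  let s3 := PySem.List.sorted st.2.2.1 (fun x => x) false
  let cols := [s1, s2, s3]
  let m : Int := max (max (s1.length : Int) (s2.length : Int)) (s3.length : Int)
  let out := (PySem.List.pyRange 0 m 1).foldl
    (fun out i => cols.foldl
      (fun out c =>
        if i < (c.length : Int) then out ++ (PySem.List.pyGet? c i).toList else out) out) []
  out ++ PySem.List.sorted st.2.2.2 (fun x => x) false

-- ===== PRECONDITION & SPEC =====
def Spec_sort_fields (names : List String) (out : List String) : Prop := out = sort_fields_alt names
instance (names : List String) (out : List String) : Decidable (Spec_sort_fields names out) := by unfold Spec_sort_fields; infer_instance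

-- ===== CLAIM (what is proved, stated in full; the proofs are below) =====
def Claim_equal_sort_fields : Prop := ∀ (names : List String), Dom_sort_fields names → Spec_sort_fields names (sort_fields names)

-- ===== LEMMAS AND PROOFS =====

-- the literal three-key dict A maintains
def pvD (x y z : List String) : PySem.Dict String (List String) :=
  PySem.Dict.mk [("strike_slip", x), ("dip_slip", y), ("tensile_slip", z)]

-- A's fold state as a function of B's fold state: A's remaining and groups are the
-- sorted versions of B's remainder and buckets, and group_count is the bucket total
def pvT (q : List String × List String × List String × List String) :
    List String × Int × PySem.Dict String (List String) :=
  (PySem.List.sorted q.2.2.2 (fun x => x) false,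
    ((q.1.length + q.2.1.length + q.2.2.1.length : Nat) : Int),
    pvD (PySem.List.sorted q.1 (fun x => x) false)
      (PySem.List.sorted q.2.1 (fun x => x) false)
      (PySem.List.sorted q.2.2.1 (fun x => x) false))

-- round-robin of three lists, one layer of heads at a time: the common shape of
-- A's pop(0) sweeps and B's index interleave
def pvRR (a b c : List String) : List String :=
  if a = [] ∧ b = [] ∧ c = [] then []
  else (a.take 1 ++ b.take 1 ++ c.take 1) ++ pvRR a.tail b.tail c.tail
termination_by a.length + b.length + c.length
decreasing_by
  rcases Decidable.not_and_iff_not_or_not.mp ‹_› with h | h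
  · cases a <;> simp_all <;> omega
  · rcases Decidable.not_and_iff_not_or_not.mp h with h' | h' <;>
      [cases b; cases c] <;> simp_all <;> omega

-- sorting again after appending to an already-sorted list = sorting the whole list
theorem pv_sorted_append (l : List String) (x : String) :
    PySem.List.sorted (PySem.List.sorted l (fun x => x) false ++ [x]) (fun x => x) false
    = PySem.List.sorted (l ++ [x]) (fun x => x) false := by
  apply PySem.List.sorted_eq_sorted_of_perm _ _ _ (fun a b h => h)
  exact (PySem.List.sorted_perm l _ _).append_right [x]

theorem pv_step_rel (q : List String × List String × List String × List String)
    (name : String) : pvAStep (pvT q) name = pvT (pvBStep q name) := by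
  obtain ⟨a, b, c, r⟩ := q
  by_cases h1 : "strike_slip" = pvKey name
  · simp [pvAStep, pvBStep, pvT, pvD, ← h1, PySem.Dict.get?_mk_cons, PySem.Dict.insert,
      Prod.ext_iff]
    exact ⟨by push_cast; ring, pv_sorted_append a name⟩
  · by_cases h2 : "dip_slip" = pvKey name
    · simp [pvAStep, pvBStep, pvT, pvD, ← h2, PySem.Dict.get?_mk_cons, PySem.Dict.insert,
        Prod.ext_iff]
      exact ⟨by push_cast; ring, pv_sorted_append b name⟩
    · by_cases h3 : "tensile_slip" = pvKey name
      · simp [pvAStep, pvBStep, pvT, pvD, ← h3, PySem.Dict.get?_mk_cons, PySem.Dict.insert,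
          Prod.ext_iff]
        exact ⟨by push_cast; ring, pv_sorted_append c name⟩
      · simp [pvAStep, pvBStep, pvT, pvD, h1, h2, h3, Ne.symm h1, Ne.symm h2, Ne.symm h3,
          PySem.Dict.get?, Prod.ext_iff]
        exact pv_sorted_append r name

theorem pv_fold_rel (names : List String) :
    ∀ q, names.foldl pvAStep (pvT q) = pvT (names.foldl pvBStep q) := by
  induction names with
  | nil => intro q; rfl
  | cons n t ih => intro q; rw [List.foldl_cons, List.foldl_cons, pv_step_rel, ih]

-- one full sweep of A's while-loop body over the three keys
theorem pv_pass_eq (x y z : List String) (gc : Int) (sl : List String) :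
    ["strike_slip", "dip_slip", "tensile_slip"].foldl pvAPass (pvD x y z, gc, sl)
    = (pvD x.tail y.tail z.tail,
       gc - (((if x = [] then 0 else 1) + (if y = [] then 0 else 1)
              + (if z = [] then 0 else 1) : Int)),
       sl ++ (x.take 1 ++ y.take 1 ++ z.take 1)) := by
  rcases x with _|⟨x0,xt⟩ <;> rcases y with _|⟨y0,yt⟩ <;> rcases z with _|⟨z0,zt⟩ <;>
    simp [pvAPass, pvD, PySem.Dict.get?_mk_cons, PySem.Dict.insert] <;> ring

-- A's while loop, started on the invariant state, is the round-robin of the groups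
theorem pv_loop_eq (n : Nat) :
    ∀ x y z sl, x.length + y.length + z.length = n →
      pvALoop (pvD x y z) ((n : Nat) : Int) sl = sl ++ pvRR x y z := by
  induction n using Nat.strong_induction_on with
  | _ n ih =>
    intro x y z sl h
    rw [pvALoop]
    by_cases hn : n = 0
    · subst hn
      have hx : x = [] := by cases x <;> simp_all
      have hy : y = [] := by cases y <;> simp_all
      have hz : z = [] := by cases z <;> simp_all
      subst hx; subst hy; subst hz
      rw [pvRR]
      simp
    · have hkeys : (pvD x y z).keys = ["strike_slip", "dip_slip", "tensile_slip"] := by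
        simp [pvD, PySem.Dict.keys_mk]
      simp only [hkeys]
      rw [pv_pass_eq]
      have hpcast : ((if x = [] then (0:Int) else 1) + (if y = [] then 0 else 1)
            + (if z = [] then 0 else 1))
          = ((((if x = [] then 0 else 1) + (if y = [] then 0 else 1)
            + (if z = [] then 0 else 1) : Nat)) : Int) := by
        split_ifs <;> norm_num
      rw [hpcast]
      set k : Nat := ((if x = [] then 0 else 1) + (if y = [] then 0 else 1)
        + (if z = [] then 0 else 1) : Nat) with hk
      have hne : x ≠ [] ∨ y ≠ [] ∨ z ≠ [] := by
        by_contra hc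
        push_neg at hc
        obtain ⟨hx, hy, hz⟩ := hc
        subst hx; subst hy; subst hz
        simp at h; omega
      have hk1 : 1 ≤ k := by
        rcases hne with h'|h'|h' <;> simp [hk, h'] <;> split_ifs <;> omega
      have hkn : k ≤ n := by
        rw [hk, ← h]
        rcases x with _|⟨x0,xt⟩ <;> rcases y with _|⟨y0,yt⟩ <;> rcases z with _|⟨z0,zt⟩ <;>
          simp <;> omega
      have htails : x.tail.length + y.tail.length + z.tail.length = n - k := by
        rw [hk, ← h]
        rcases x with _|⟨x0,xt⟩ <;> rcases y with _|⟨y0,yt⟩ <;> rcases z with _|⟨z0,zt⟩ <;>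
          simp <;> omega
      rw [if_neg (by exact_mod_cast hn)]
      rw [dif_pos (by constructor <;> push_cast <;> omega)]
      have hcast : ((n:Int) - (k:Int)) = ((n - k : Nat) : Int) := by omega
      simp only [hcast]
      rw [ih (n - k) (by omega) x.tail y.tail z.tail _ htails]
      conv_rhs => rw [pvRR]
      rw [if_neg (by rintro ⟨h1,h2,h3⟩; rcases hne with h'|h'|h' <;> exact h' ‹_›)]
      simp [List.append_assoc]

-- shifting one row of B's interleave down to the tails
theorem pv_shift (out l : List String) (j : Nat) :
    (if 1 + (j:Int) < (l.length : Int) then out ++ (PySem.List.pyGet? l (1 + (j:Int))).toList else out)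
    = (if (j:Int) < (l.tail.length : Int) then out ++ (PySem.List.pyGet? l.tail (j:Int)).toList else out) := by
  cases l with
  | nil => simp; exact fun h => absurd h (by omega)
  | cons hd tl =>
    have h1 : (1 + (j:Int)) = ((j+1 : Nat) : Int) := by push_cast; ring
    rw [h1, PySem.List.pyGet?_natCast, PySem.List.pyGet?_natCast]
    simp only [List.getElem?_cons_succ, List.tail_cons, List.length_cons]
    by_cases hj : j < tl.length
    · rw [if_pos (by push_cast; omega), if_pos (by push_cast; omega)]
    · rw [if_neg (by push_cast; omega), if_neg (by push_cast; omega)]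

-- B's index interleave is the same round-robin
theorem pv_inter (n : Nat) :
    ∀ (a b c : List String) (acc : List String),
      max (max a.length b.length) c.length = n →
      (PySem.List.pyRange 0 (n : Int) 1).foldl
        (fun out i => [a, b, c].foldl
          (fun out c =>
            if i < (c.length : Int) then out ++ (PySem.List.pyGet? c i).toList else out) out) acc
      = acc ++ pvRR a b c := by
  induction n with
  | zero =>
    intro a b c acc h
    have hx : a = [] := by cases a <;> simp_all
    have hy : b = [] := by cases b <;> simp_all
    have hz : c = [] := by cases c <;> simp_all
    subst hx; subst hy; subst hz
    rw [pvRR]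
    simp [PySem.List.pyRange_one_eq_nil]
  | succ k ih =>
    intro a b c acc h
    rw [PySem.List.pyRange_one_cons (by push_cast; omega), List.foldl_cons]
    have hrow : ([a, b, c].foldl
        (fun out c =>
          if (0:Int) < (c.length : Int) then out ++ (PySem.List.pyGet? c (0:Int)).toList else out) acc)
        = acc ++ (a.take 1 ++ b.take 1 ++ c.take 1) := by
      rcases a with _|⟨a0,at'⟩ <;> rcases b with _|⟨b0,bt⟩ <;> rcases c with _|⟨c0,ct⟩ <;>
        simp [PySem.List.pyGet?, PySem.List.pyIdx?]
    show (PySem.List.pyRange 1 ((k:Int)+1) 1).foldl _ ([a, b, c].foldl _ acc) = _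
    rw [hrow]
    have htails : max (max a.tail.length b.tail.length) c.tail.length = k := by
      simp only [List.length_tail]
      omega
    rw [PySem.List.pyRange_one (a := 1), List.foldl_map]
    have hk1 : (((k:Int)+1)-1).toNat = k := by omega
    rw [hk1]
    have ih' := ih a.tail b.tail c.tail (acc ++ (a.take 1 ++ b.take 1 ++ c.take 1)) htails
    rw [PySem.List.pyRange_one (a := 0), List.foldl_map] at ih'
    have hk0 : ((k:Int)-0).toNat = k := by omega
    rw [hk0] at ih'
    have hcong : ∀ out (j : Nat), j ∈ List.range k →
        ([a, b, c].foldl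
          (fun out c =>
            if (1 + (j:Int)) < (c.length : Int) then out ++ (PySem.List.pyGet? c (1 + (j:Int))).toList else out) out)
        = ([a.tail, b.tail, c.tail].foldl
          (fun out c =>
            if (0 + (j:Int)) < (c.length : Int) then out ++ (PySem.List.pyGet? c (0 + (j:Int))).toList else out) out) := by
      intro out j _
      simp only [List.foldl_cons, List.foldl_nil, pv_shift, zero_add]
    rw [PySem.List.foldl_congr_mem _ _ _ _ hcong]
    rw [ih']
    conv_rhs => rw [pvRR]
    by_cases hall : a = [] ∧ b = [] ∧ c = []
    · obtain ⟨h1,h2,h3⟩ := hall; subst h1; subst h2; subst h3; simp_all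
    · rw [if_neg hall]
      simp [List.append_assoc]

-- ===== VERDICT (by name: the statement is the Claim_ definition above) =====
theorem sort_fields_spec : Claim_equal_sort_fields := by
  intro names _
  show sort_fields names = sort_fields_alt names
  simp only [sort_fields, sort_fields_alt]
  rw [show (([], (0:Int), PySem.Dict.ofList
      [("strike_slip", ([] : List String)), ("dip_slip", []), ("tensile_slip", [])]) :
      List String × Int × PySem.Dict String (List String)) = pvT ([], [], [], []) from rfl]
  rw [pv_fold_rel]
  obtain ⟨a, b, c, r⟩ := names.foldl pvBStep ([], [], [], [])
  simp only [pvT]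
  have hlen : ((a.length + b.length + c.length : Nat) : Int)
      = (((PySem.List.sorted a (fun x => x) false).length
        + (PySem.List.sorted b (fun x => x) false).length
        + (PySem.List.sorted c (fun x => x) false).length : Nat) : Int) := by
    simp [PySem.List.length_sorted]
  rw [hlen, pv_loop_eq _ _ _ _ [] rfl]
  have hM : (max (max ((PySem.List.sorted a (fun x => x) false).length : Int)
        ((PySem.List.sorted b (fun x => x) false).length : Int))
        ((PySem.List.sorted c (fun x => x) false).length : Int))
      = ((max (max (PySem.List.sorted a (fun x => x) false).length
          (PySem.List.sorted b (fun x => x) false).length)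
          (PySem.List.sorted c (fun x => x) false).length : Nat) : Int) := by
    push_cast; ring
  rw [hM, pv_inter _ _ _ _ [] rfl]
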